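-- pv_equiv track=rewrite | github.com/Hwichang-0222/embed | pyEmbed0624/org/embed/p292.py | base16
-- ===== SOURCE A (Python) =====
-- def base16(n):
--     def alch(i):
--         key = {10:'A', 11:'B', 12:'C', 13:'D', 14:'E', 15:'F'}
--         if i < 10:
--             return i
--         else :
--             return key.get(i)
--     if n == 0 :
--         return ""
--     else :
--         s = base16(n // 16)
--         return str(s) + str(' ') + str(alch(n % 16))
-- ===== SOURCE B (Python) =====
-- def base16(n):
--     if n == 0:
--         return ""
--     digits = []
--     while n:
--         r = n % 16
--         digits.append(str(r) if r < 10 else "ABCDEF"[r - 10])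
--         n //= 16
--     return "".join(" " + d for d in reversed(digits))
-- ===== Notes on version B (the rewrite author's own statement) =====
-- stated objective: alternative
-- what changed: Replaces A's recursion (recursive call per digit with string concatenation on the way back) by an iterative while-loop collecting digits least-significant first into a list, then reversing and joining; same cost, no recursion.
import Mathlib
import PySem

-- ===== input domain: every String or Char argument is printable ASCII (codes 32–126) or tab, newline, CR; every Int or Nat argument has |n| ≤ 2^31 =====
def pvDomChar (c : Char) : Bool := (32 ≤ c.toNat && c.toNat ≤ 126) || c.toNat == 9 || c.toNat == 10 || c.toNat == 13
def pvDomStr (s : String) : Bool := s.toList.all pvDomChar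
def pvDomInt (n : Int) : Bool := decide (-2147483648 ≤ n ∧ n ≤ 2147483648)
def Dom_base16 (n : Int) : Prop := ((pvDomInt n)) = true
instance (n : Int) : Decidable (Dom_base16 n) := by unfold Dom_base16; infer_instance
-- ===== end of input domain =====

-- B: iterative digit collection (least-significant first, then reverse and join)
-- instead of A's recursion; equivalence over n ≥ 0 (Python A raises RecursionError
-- for negative n, B's while-loop would not terminate there: excluded by Pre_).


-- ===== PORT A =====
-- alch(i) followed by the outer str(): dict lookup for 10..15, str(i) for i < 10
-- (str(None) = "None" for the unreachable other case, exactly as Python's str).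
def alchStr (i : Int) : String :=
  let key : PySem.Dict Int String :=
    PySem.Dict.ofList [(10, "A"), (11, "B"), (12, "C"), (13, "D"), (14, "E"), (15, "F")]
  if i < 10 then PySem.Int.toStr i
  else match key.get? i with
       | some s => s
       | none => "None"

-- Recursive structure of A. Python diverges (RecursionError) for n < 0; that region is
-- outside Pre_base16, and for termination the guard here is n ≤ 0 (equal to n == 0 on Pre_).
def base16 (n : Int) : String :=
  if n ≤ 0 then ""
  else base16 (PySem.Int.floordiv n 16) ++ " " ++ alchStr (PySem.Int.mod n 16)
termination_by n.toNat
decreasing_by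
  have h16 : PySem.Int.floordiv n 16 = n / 16 := PySem.Int.floordiv_eq_ediv_of_pos (by omega)
  rw [h16]; omega

-- ===== PORT B =====
-- the while-loop body: one digit string per iteration, least-significant first
def b16Digit (r : Int) : String :=
  if r < 10 then PySem.Int.toStr r
  else match PySem.Str.pyGet? "ABCDEF" (r - 10) with
       | some c => String.singleton c
       | none => ""   -- unreachable for r = n % 16

def b16Digits (n : Int) : List String :=
  if n ≤ 0 then []
  else b16Digit (PySem.Int.mod n 16) :: b16Digits (PySem.Int.floordiv n 16)
termination_by n.toNat
decreasing_by
  have h16 : PySem.Int.floordiv n 16 = n / 16 := PySem.Int.floordiv_eq_ediv_of_pos (by omega)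
  rw [h16]; omega

def base16_alt (n : Int) : String :=
  if n = 0 then ""
  else String.join (((b16Digits n).reverse).map (fun d => " " ++ d))

-- ===== PRECONDITION & SPEC =====
-- Pre_ excludes n < 0, on which Python A raises RecursionError (n // 16 never reaches 0).
def Pre_base16 (n : Int) : Prop := 0 ≤ n
instance (n : Int) : Decidable (Pre_base16 n) := by unfold Pre_base16; infer_instance
def pvWitness_base16 : Int := (255)

def Spec_base16 (n : Int) (out : String) : Prop := out = base16_alt n
instance (n : Int) (out : String) : Decidable (Spec_base16 n out) := by unfold Spec_base16; infer_instance

-- ===== CLAIM (what is proved, stated in full; the proofs are below) =====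
def Claim_equal_base16 : Prop := ∀ (n : Int), Dom_base16 n → Pre_base16 n → Spec_base16 n (base16 n)

-- ===== LEMMAS AND PROOFS =====

theorem join_append_one (xs : List String) (s : String) :
    String.join (xs ++ [s]) = String.join xs ++ s := by
  rw [← String.toList_inj]
  simp

theorem digit_eq (r : Int) (h0 : 0 ≤ r) (h1 : r < 16) : alchStr r = b16Digit r := by
  interval_cases r <;> rfl

theorem base16_eq_join (k : Nat) : ∀ n : Int, 0 ≤ n → n.toNat ≤ k →
    base16 n = String.join (((b16Digits n).reverse).map (fun d => " " ++ d)) := by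
  induction k with
  | zero =>
    intro n h0 hk
    have hn : n = 0 := by omega
    subst hn; rw [base16]; simp [b16Digits, String.join]
  | succ k ih =>
    intro n h0 hk
    by_cases hz : n ≤ 0
    · have hn : n = 0 := by omega
      subst hn; rw [base16]; simp [b16Digits, String.join]
    · have hpos : 0 < n := by omega
      have h16 : PySem.Int.floordiv n 16 = n / 16 := PySem.Int.floordiv_eq_ediv_of_pos (by omega)
      have hm : PySem.Int.mod n 16 = n % 16 := PySem.Int.mod_eq_emod_of_pos (by omega)
      rw [base16, b16Digits]
      simp only [hz, if_false]
      have hrec := ih (PySem.Int.floordiv n 16) (by rw [h16]; positivity)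
        (by rw [h16]; omega)
      rw [hrec, List.reverse_cons, List.map_append]
      simp only [List.map_cons, List.map_nil]
      rw [join_append_one]
      rw [digit_eq (PySem.Int.mod n 16) (by rw [hm]; omega) (by rw [hm]; omega)]
      simp [String.append_assoc]

-- ===== VERDICT (by name: the statement is the Claim_ definition above) =====
theorem base16_spec : Claim_equal_base16 := by
  intro n _ hpre
  unfold Spec_base16 base16_alt
  by_cases hz : n = 0
  · subst hz; rw [base16]; simp
  · rw [if_neg hz]
    exact base16_eq_join n.toNat n hpre le_rfl
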